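-- pv_equiv track=rewrite | github.com/achie27/cp | strings/bracket_match.py | bracket_match
-- ===== SOURCE A (Python) =====
-- def bracket_match(text):
--   unmatched_open_brackets = 0
--   unmatched_closing_brackets = 0
--
--   for i, c in enumerate(text):
--     if c == '(':
--       unmatched_open_brackets += 1
--     else:
--       if unmatched_open_brackets > 0:
--         unmatched_open_brackets -= 1
--       else:
--         unmatched_closing_brackets += 1
--
--   return unmatched_open_brackets + unmatched_closing_brackets
-- ===== SOURCE B (Python) =====
-- def bracket_match(text):
--   prefix = [0]
--   bal = 0
--   for c in text:
--     bal += 1 if c == '(' else -1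
--     prefix.append(bal)
--   return bal - 2 * min(prefix)
-- ===== Notes on version B (the rewrite author's own statement) =====
-- stated objective: alternative
-- what changed: B replaces A's two clamped counters (open/close with reset logic) by building the list of unclamped prefix balances and combining its last value and minimum in the closed form bal - 2*min(prefix).
import Mathlib
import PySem

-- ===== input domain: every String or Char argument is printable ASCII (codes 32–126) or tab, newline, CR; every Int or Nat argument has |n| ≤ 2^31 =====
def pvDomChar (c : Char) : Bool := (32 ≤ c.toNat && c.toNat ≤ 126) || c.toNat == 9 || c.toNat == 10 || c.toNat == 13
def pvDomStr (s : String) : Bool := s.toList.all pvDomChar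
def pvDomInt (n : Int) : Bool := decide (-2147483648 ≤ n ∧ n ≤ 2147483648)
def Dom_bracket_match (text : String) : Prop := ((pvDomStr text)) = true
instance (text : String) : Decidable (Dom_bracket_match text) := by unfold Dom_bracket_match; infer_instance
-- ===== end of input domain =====

-- B replaces A's two clamped counters (clamp-and-reset loop) by a staged computation: build the list of unclamped prefix balances, then return bal - 2*min(prefix) (alternative decomposition, same cost).


-- ===== PORT A =====
-- for c in text: clamp-and-reset update of (unmatched_open, unmatched_closing)
def bracket_match (text : String) : Int :=
  let st := text.toList.foldl
    (fun (st : Int × Int) c =>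
      if c = '(' then (st.1 + 1, st.2)
      else if st.1 > 0 then (st.1 - 1, st.2)
      else (st.1, st.2 + 1))
    (0, 0)
  st.1 + st.2

-- ===== PORT B =====
-- stage 1: the loop appends each running balance to the list `prefix` (state: prefix, bal);
-- stage 2: closed form bal - 2*min(prefix).  `prefix` starts as [0] and only grows, so
-- Python's min(prefix) is defined; (PySem.List.min? …).getD 0 is exact here.
def bracket_match_alt (text : String) : Int :=
  let st := text.toList.foldl
    (fun (st : List Int × Int) c =>
      let b := st.2 + (if c = '(' then 1 else -1)
      (st.1 ++ [b], b))
    ([0], 0)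
  st.2 - 2 * (PySem.List.min? st.1 (fun y => y)).getD 0

-- ===== PRECONDITION & SPEC =====
def Spec_bracket_match (text : String) (out : Int) : Prop := out = bracket_match_alt text
instance (text : String) (out : Int) : Decidable (Spec_bracket_match text out) := by unfold Spec_bracket_match; infer_instance

-- ===== CLAIM (what is proved, stated in full; the proofs are below) =====
def Claim_equal_bracket_match : Prop := ∀ (text : String), Dom_bracket_match text → Spec_bracket_match text (bracket_match text)

-- ===== LEMMAS AND PROOFS =====

-- min of the prefix list, as B's port reads it
def pvMn (acc : List Int) : Int := (PySem.List.min? acc (fun y => y)).getD 0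

theorem pvMn_append (x : Int) (t : List Int) (b : Int) :
    pvMn ((x :: t) ++ [b]) = min (pvMn (x :: t)) b := by
  simp [pvMn, PySem.List.min?_id_cons, List.foldl_append]

-- invariant relating A's clamped pair to B's (prefix list, balance) state:
-- open = bal - min, closing = -min
theorem bracket_match_fold_rel (l : List Char) (x : Int) (t : List Int) (bal : Int)
    (hm0 : pvMn (x :: t) ≤ 0) (hmb : pvMn (x :: t) ≤ bal) :
    l.foldl
      (fun (st : Int × Int) c =>
        if c = '(' then (st.1 + 1, st.2)
        else if st.1 > 0 then (st.1 - 1, st.2)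
        else (st.1, st.2 + 1))
      (bal - pvMn (x :: t), -pvMn (x :: t))
    = (let res := l.foldl
        (fun (st : List Int × Int) c =>
          let b := st.2 + (if c = '(' then 1 else -1)
          (st.1 ++ [b], b))
        (x :: t, bal)
       (res.2 - pvMn res.1, -pvMn res.1)) := by
  induction l generalizing x t bal with
  | nil => simp
  | cons c tl ih =>
    simp only [List.foldl_cons]
    by_cases hc : c = '('
    · subst hc
      simp only [if_true]
      have h1 : pvMn ((x :: t) ++ [bal + 1]) = pvMn (x :: t) := by
        rw [pvMn_append]; omega
      rw [List.cons_append] at h1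
      simp only [List.cons_append]
      have := ih x (t ++ [bal + 1]) (bal + 1) (by rw [h1]; omega) (by rw [h1]; omega)
      rw [h1] at this
      rw [show bal - pvMn (x :: t) + 1 = bal + 1 - pvMn (x :: t) by ring]
      exact this
    · simp only [if_neg hc]
      rw [show bal + (-1 : Int) = bal - 1 by ring]
      by_cases hp : bal - pvMn (x :: t) > 0
      · simp only [if_pos hp]
        have h1 : pvMn ((x :: t) ++ [bal - 1]) = pvMn (x :: t) := by
          rw [pvMn_append]; omega
        rw [List.cons_append] at h1
        simp only [List.cons_append]
        have := ih x (t ++ [bal - 1]) (bal - 1) (by rw [h1]; omega) (by rw [h1]; omega)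
        rw [h1] at this
        rw [show bal - pvMn (x :: t) - 1 = bal - 1 - pvMn (x :: t) by ring]
        exact this
      · -- balance is at its minimum: closing counter increments, the prefix minimum drops to bal - 1
        simp only [if_neg hp]
        have hbm : bal = pvMn (x :: t) := by omega
        have h1 : pvMn ((x :: t) ++ [bal - 1]) = bal - 1 := by
          rw [pvMn_append]; omega
        rw [List.cons_append] at h1
        simp only [List.cons_append]
        have := ih x (t ++ [bal - 1]) (bal - 1) (by rw [h1]; omega) (by rw [h1])
        rw [h1] at this
        rw [show bal - pvMn (x :: t) = bal - 1 - (bal - 1) by omega,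
            show -pvMn (x :: t) + 1 = -(bal - 1) by omega]
        exact this

-- ===== VERDICT (by name: the statement is the Claim_ definition above) =====
theorem bracket_match_spec : Claim_equal_bracket_match := by
  intro text _
  unfold Spec_bracket_match bracket_match bracket_match_alt
  have hm : pvMn [0] = 0 := by simp [pvMn, PySem.List.min?_id_cons]
  have h := bracket_match_fold_rel text.toList 0 [] 0 (by rw [hm]) (by rw [hm])
  rw [hm] at h
  simp only [sub_zero, neg_zero] at h
  rw [h]
  simp only [pvMn]
  omega
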